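-- pv_equiv track=rewrite | github.com/dayoon-ko/illusory_completion | epistemic_ledger/run.py | save_blocks
-- ===== SOURCE A (Python) =====
-- def save_blocks(item, blocks):
--     """Save extracted blocks back to item."""
--     item["thinking_blocks"] = []
--     item["query_blocks"] = []
--     item["result_blocks"] = []
--
--     for prev_thinking, query, result, next_thinking in blocks:
--         item["thinking_blocks"].append(prev_thinking)
--         item["query_blocks"].append(query)
--         item["result_blocks"].append(result)
--     item["thinking_blocks"].append(blocks[-1][-1])
--
--     return item
-- ===== SOURCE B (Python) =====
-- def save_blocks(item, blocks):
--     """Save extracted blocks back to item (structural recursion on blocks)."""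
--     def go(bs):
--         if len(bs) == 1:
--             t, q, r, n = bs[0]
--             return [t, n], [q], [r]
--         t, q, r, _ = bs[0]
--         ts, qs, rs = go(bs[1:])
--         return [t] + ts, [q] + qs, [r] + rs
--     ts, qs, rs = go(blocks)
--     item["thinking_blocks"] = ts
--     item["query_blocks"] = qs
--     item["result_blocks"] = rs
--     return item
-- ===== Notes on version B (the rewrite author's own statement) =====
-- stated objective: alternative
-- what changed: Replaces A's iterative append loop over dict-held lists plus a post-loop append of blocks[-1][-1] with a structural recursion that builds the three columns cons-wise, folding the final next_thinking into the single-element base case, and assigns the finished lists once.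
import Mathlib
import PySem

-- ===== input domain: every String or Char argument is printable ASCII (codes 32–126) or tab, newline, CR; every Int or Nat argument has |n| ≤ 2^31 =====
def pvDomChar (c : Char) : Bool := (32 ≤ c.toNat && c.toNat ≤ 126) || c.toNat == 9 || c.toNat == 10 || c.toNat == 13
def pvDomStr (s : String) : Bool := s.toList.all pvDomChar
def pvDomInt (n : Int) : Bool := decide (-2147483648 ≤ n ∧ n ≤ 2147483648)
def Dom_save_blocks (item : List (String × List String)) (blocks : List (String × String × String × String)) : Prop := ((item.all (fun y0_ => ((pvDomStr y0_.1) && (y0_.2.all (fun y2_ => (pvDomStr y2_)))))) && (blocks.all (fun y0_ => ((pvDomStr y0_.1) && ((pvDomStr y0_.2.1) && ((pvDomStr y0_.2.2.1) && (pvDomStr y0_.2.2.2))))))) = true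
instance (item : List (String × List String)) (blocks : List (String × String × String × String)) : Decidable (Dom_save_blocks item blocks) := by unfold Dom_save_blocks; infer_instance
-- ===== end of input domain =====

-- ===== PORT A =====
-- B replaces A's loop-and-append over dict-held lists with a structural recursion building the columns; equivalence is about the RETURN value (Python A and B both mutate `item` in place identically).
def save_blocks (item : List (String × List String)) (blocks : List (String × String × String × String)) : List (String × List String) :=
  let d := PySem.Dict.mk item
  let d := d.insert "thinking_blocks" []
  let d := d.insert "query_blocks" []
  let d := d.insert "result_blocks" []
  let d := blocks.foldl (fun d b =>
      let d := d.modify "thinking_blocks" [] (· ++ [b.1])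
      let d := d.modify "query_blocks" [] (· ++ [b.2.1])
      d.modify "result_blocks" [] (· ++ [b.2.2.1])) d
  -- blocks[-1][-1]; on empty blocks Python raises IndexError (excluded by Pre_), port uses "" there
  let lastNext := match PySem.List.pyGet? blocks (-1) with | some b => b.2.2.2 | none => ""
  let d := d.modify "thinking_blocks" [] (· ++ [lastNext])
  d.items

-- ===== PORT B =====
-- go(bs): recursion on the block list; the single-element base case already carries the final next_thinking.
-- Python's go([]) raises IndexError (excluded by Pre_); the port returns empty columns there.
def pvGoB : List (String × String × String × String) → List String × List String × List String
  | [(t, q, r, n)] => ([t, n], [q], [r])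
  | (t, q, r, _) :: rest =>
      let (ts, qs, rs) := pvGoB rest
      (t :: ts, q :: qs, r :: rs)
  | [] => ([], [], [])

def save_blocks_alt (item : List (String × List String)) (blocks : List (String × String × String × String)) : List (String × List String) :=
  let (ts, qs, rs) := pvGoB blocks
  let d := PySem.Dict.mk item
  let d := d.insert "thinking_blocks" ts
  let d := d.insert "query_blocks" qs
  let d := d.insert "result_blocks" rs
  d.items

-- ===== PRECONDITION & SPEC =====
-- Pre_ excludes only blocks = [], on which Python A raises IndexError (blocks[-1]) and Python B raises IndexError (bs[0] in go).
def Pre_save_blocks (item : List (String × List String)) (blocks : List (String × String × String × String)) : Prop := blocks ≠ []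
instance (item : List (String × List String)) (blocks : List (String × String × String × String)) : Decidable (Pre_save_blocks item blocks) := by unfold Pre_save_blocks; infer_instance
def pvWitness_save_blocks : (List (String × List String)) × (List (String × String × String × String)) := ([("id", ["x"])], [("t", "q", "r", "n")])
def Spec_save_blocks (item : List (String × List String)) (blocks : List (String × String × String × String)) (out : List (String × List String)) : Prop := out = save_blocks_alt item blocks
instance (item : List (String × List String)) (blocks : List (String × String × String × String)) (out : List (String × List String)) : Decidable (Spec_save_blocks item blocks out) := by unfold Spec_save_blocks; infer_instance

-- ===== CLAIM (what is proved, stated in full; the proofs are below) =====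
def Claim_equal_save_blocks : Prop := ∀ (item : List (String × List String)) (blocks : List (String × String × String × String)), Dom_save_blocks item blocks → Pre_save_blocks item blocks → Spec_save_blocks item blocks (save_blocks item blocks)

-- ===== LEMMAS AND PROOFS =====

-- Overwriting an immediately-inserted key replaces its value; inserts of distinct keys commute when the pushed key is already present.
theorem pv_insert_insert_self {κ ν : Type} [BEq κ] [LawfulBEq κ] (d : PySem.Dict κ ν) (k : κ) (v v' : ν) :
    (d.insert k v).insert k v' = d.insert k v' := by
  apply PySem.Dict.ext
  by_cases hc : d.contains k = true
  · simp [PySem.Dict.items_insert, hc, PySem.Dict.contains_insert_self, List.map_map]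
    intro a b _
    by_cases h : a = k <;> simp [h]
  · have h1 : (d.insert k v).contains k = true := PySem.Dict.contains_insert_self d k v
    simp [PySem.Dict.items_insert, hc, h1]
    conv_rhs => rw [← List.map_id d.items]
    apply List.map_congr_left
    intro p hp
    have hk : p.1 ∈ d.keys := by
      simp only [PySem.Dict.keys]
      exact List.mem_map_of_mem hp
    have : ¬ p.1 = k := by
      intro he
      exact hc ((PySem.Dict.contains_iff_mem_keys d k).2 (he ▸ hk))
    simp [this]

theorem pv_insert_comm_of_contains {κ ν : Type} [BEq κ] [LawfulBEq κ] (d : PySem.Dict κ ν) (k k' : κ) (v w : ν)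
    (hne : k ≠ k') (hc : d.contains k = true) :
    (d.insert k' w).insert k v = (d.insert k v).insert k' w := by
  apply PySem.Dict.ext
  by_cases hc' : d.contains k' = true
  · have h1 : (d.insert k' w).contains k = true := by
      simp [PySem.Dict.contains_insert, hc]
    have h2 : (d.insert k v).contains k' = true := by
      simp [PySem.Dict.contains_insert, hc']
    simp [PySem.Dict.items_insert, hc, hc', h1, h2, List.map_map]
    intro a b _
    by_cases hp : a = k <;> by_cases hp' : a = k' <;>
      simp_all [Ne.symm hne]
  · have h1 : (d.insert k' w).contains k = true := by
      simp [PySem.Dict.contains_insert, hc]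
    have h2 : (d.insert k v).contains k' = false := by
      simp [PySem.Dict.contains_insert, hc', Ne.symm hne]
    simp [PySem.Dict.items_insert, hc, hc', h1, h2]
    intro h; exact absurd h.symm hne

-- getD through the triple insert, at each of the three keys.
theorem pv_getD_TQR (d : PySem.Dict String (List String)) (t q r : List String) :
    ((((d.insert "thinking_blocks" t).insert "query_blocks" q).insert "result_blocks" r).getD "thinking_blocks" [] = t)
    ∧ ((((d.insert "thinking_blocks" t).insert "query_blocks" q).insert "result_blocks" r).getD "query_blocks" [] = q)
    ∧ ((((d.insert "thinking_blocks" t).insert "query_blocks" q).insert "result_blocks" r).getD "result_blocks" [] = r) := by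
  refine ⟨?_, ?_, ?_⟩ <;>
    simp [PySem.Dict.getD_insert]

-- modify at each of the three keys, expressed back in triple-insert shape.
theorem pv_modT (d : PySem.Dict String (List String)) (t q r : List String) (f : List String → List String) :
    ((((d.insert "thinking_blocks" t).insert "query_blocks" q).insert "result_blocks" r).modify "thinking_blocks" [] f)
    = (((d.insert "thinking_blocks" (f t)).insert "query_blocks" q).insert "result_blocks" r) := by
  have hg := (pv_getD_TQR d t q r).1
  rw [PySem.Dict.modify, hg]
  rw [pv_insert_comm_of_contains _ _ _ _ _ (by decide)
        (by simp [PySem.Dict.contains_insert, PySem.Dict.contains_insert_self])]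
  rw [pv_insert_comm_of_contains _ _ _ _ _ (by decide)
        (PySem.Dict.contains_insert_self d _ t)]
  rw [pv_insert_insert_self]

theorem pv_modQ (d : PySem.Dict String (List String)) (t q r : List String) (f : List String → List String) :
    ((((d.insert "thinking_blocks" t).insert "query_blocks" q).insert "result_blocks" r).modify "query_blocks" [] f)
    = (((d.insert "thinking_blocks" t).insert "query_blocks" (f q)).insert "result_blocks" r) := by
  have hg := (pv_getD_TQR d t q r).2.1
  rw [PySem.Dict.modify, hg]
  rw [pv_insert_comm_of_contains _ _ _ _ _ (by decide)
        (PySem.Dict.contains_insert_self _ _ q)]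
  rw [pv_insert_insert_self]

theorem pv_modR (d : PySem.Dict String (List String)) (t q r : List String) (f : List String → List String) :
    ((((d.insert "thinking_blocks" t).insert "query_blocks" q).insert "result_blocks" r).modify "result_blocks" [] f)
    = (((d.insert "thinking_blocks" t).insert "query_blocks" q).insert "result_blocks" (f r)) := by
  have hg := (pv_getD_TQR d t q r).2.2
  rw [PySem.Dict.modify, hg, pv_insert_insert_self]

-- The append loop of A, in closed column form.
theorem pv_loop (bs : List (String × String × String × String)) :
    ∀ (d : PySem.Dict String (List String)) (t q r : List String),
    bs.foldl (fun d b =>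
      let d := d.modify "thinking_blocks" [] (· ++ [b.1])
      let d := d.modify "query_blocks" [] (· ++ [b.2.1])
      d.modify "result_blocks" [] (· ++ [b.2.2.1]))
      (((d.insert "thinking_blocks" t).insert "query_blocks" q).insert "result_blocks" r)
    = (((d.insert "thinking_blocks" (t ++ bs.map (fun b => b.1))).insert "query_blocks"
          (q ++ bs.map (fun b => b.2.1))).insert "result_blocks" (r ++ bs.map (fun b => b.2.2.1))) := by
  induction bs with
  | nil => intro d t q r; simp
  | cons b bs ih =>
    intro d t q r
    simp only [List.foldl_cons, List.map_cons]
    rw [pv_modT, pv_modQ, pv_modR, ih]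
    simp

-- B's recursion computes exactly the three columns, with the last tuple's next_thinking appended to the first.
theorem pvGoB_eq (bs : List (String × String × String × String)) (h : bs ≠ []) :
    pvGoB bs = (bs.map (fun b => b.1) ++ [(match bs.getLast? with | some b => b.2.2.2 | none => "")],
                bs.map (fun b => b.2.1), bs.map (fun b => b.2.2.1)) := by
  induction bs with
  | nil => exact absurd rfl h
  | cons b rest ih =>
    obtain ⟨t, q, r, n⟩ := b
    cases rest with
    | nil => simp [pvGoB]
    | cons b' rest' =>
      simp only [pvGoB, ih (by simp)]
      simp [List.getLast?_cons_cons]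

-- ===== VERDICT (by name: the statement is the Claim_ definition above) =====
theorem save_blocks_spec : Claim_equal_save_blocks := by
  intro item blocks _ hpre
  unfold Spec_save_blocks save_blocks save_blocks_alt
  simp only
  rw [pv_loop, pv_modT, pvGoB_eq blocks hpre, PySem.List.pyGet?_neg_one]
  simp
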